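-- pv_equiv track=rewrite | github.com/foxtailer/learn | courses-books/yt/interv_questions/subsequense.py | subsequense2
-- ===== SOURCE A (Python) =====
-- def subsequense2(seq, target):
--     """
--     Return true if target is subsequense of sequense
--     >>> subsequense2("abcde","bcd")
--     True
--     >>> subsequense2("abcde","bfd")
--     False
--     """
--     if len(seq)<len(target):
--         return False
--
--     matches = []
--     seq_list = list(seq)
--     for i in target:
--         try:
--             matches.append(seq_list.pop(seq_list.index(i)))
--         except:
--             return False
--     return len(target)==len(matches)
-- ===== SOURCE B (Python) =====
-- def subsequense2(seq, target):
--     """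
--     Return true if target is subsequense of sequense
--     >>> subsequense2("abcde","bcd")
--     True
--     >>> subsequense2("abcde","bfd")
--     False
--     """
--     sa = sorted(seq)
--     st = sorted(target)
--     j = 0
--     for c in sa:
--         if j < len(st) and c == st[j]:
--             j += 1
--     return j == len(st)
-- ===== Notes on version B (the rewrite author's own statement) =====
-- stated objective: faster
-- what changed: A consumes one occurrence per target character from a mutable copy of seq via repeated list.index+pop scans; B sorts both strings once and runs a single two-pointer merge scan over the sorted copies, returning whether the target pointer reached the end.
import Mathlib
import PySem

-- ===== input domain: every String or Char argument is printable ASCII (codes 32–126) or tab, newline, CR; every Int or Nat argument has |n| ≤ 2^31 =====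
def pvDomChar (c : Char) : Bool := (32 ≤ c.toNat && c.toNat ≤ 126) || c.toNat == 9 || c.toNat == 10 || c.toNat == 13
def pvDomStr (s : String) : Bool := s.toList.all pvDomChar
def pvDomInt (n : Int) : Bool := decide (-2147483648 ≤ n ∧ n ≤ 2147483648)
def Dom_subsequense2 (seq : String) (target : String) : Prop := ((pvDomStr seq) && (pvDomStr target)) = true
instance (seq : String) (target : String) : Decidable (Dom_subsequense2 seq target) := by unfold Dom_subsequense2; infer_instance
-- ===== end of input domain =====

-- B replaces A's per-character list.index + pop scans over a shrinking copy of seq with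
-- sort-both-strings-then-one-two-pointer-merge-scan; return values proved equal on all inputs.

-- ===== PORT A =====
-- A's for-loop over target: state = (remaining seq_list, ms = A's 'matches'); none = the 'except: return False' branch
def subseqAux : List Char → List Char → List Char → Option (List Char)
  | [], _, ms => some ms
  | c :: rest, sl, ms =>
    match PySem.List.index? sl c with
    | none => none                     -- seq_list.index(i) raises ValueError → except: return False
    | some k =>
      match PySem.List.pop? sl (k : Int) with
      | none => none                   -- pop out of range (unreachable; kept for the try's scope)
      | some (x, sl') => subseqAux rest sl' (ms ++ [x])

def subsequense2 (seq : String) (target : String) : Bool :=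
  if PySem.Str.len seq < PySem.Str.len target then false
  else
    match subseqAux target.toList seq.toList [] with
    | none => false
    | some ms => PySem.Str.len target == (ms.length : Int)

-- ===== PORT B =====
-- Source B's for-loop over sa: walks sa with the index j into st ('j < len(st) and c == st[j]')
def mergeLoop : List Char → List Char → Nat → Nat
  | [], _, j => j
  | c :: rest, st, j =>
    if h : j < st.length then
      if c = st[j] then mergeLoop rest st (j + 1) else mergeLoop rest st j
    else mergeLoop rest st j

def subsequense2_alt (seq : String) (target : String) : Bool :=
  let sa := PySem.List.sorted seq.toList (fun x => x) false
  let st := PySem.List.sorted target.toList (fun x => x) false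
  mergeLoop sa st 0 == st.length

-- ===== PRECONDITION & SPEC =====
def Spec_subsequense2 (seq : String) (target : String) (out : Bool) : Prop := out = subsequense2_alt seq target
instance (seq : String) (target : String) (out : Bool) : Decidable (Spec_subsequense2 seq target out) := by unfold Spec_subsequense2; infer_instance

-- ===== CLAIM (what is proved, stated in full; the proofs are below) =====
def Claim_equal_subsequense2 : Prop := ∀ (seq : String) (target : String), Dom_subsequense2 seq target → Spec_subsequense2 seq target (subsequense2 seq target)

-- ===== LEMMAS AND PROOFS =====

theorem eraseIdx_append_cons (pre suf : List Char) (c : Char) :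
    (pre ++ c :: suf).eraseIdx pre.length = pre ++ suf := by
  induction pre with
  | nil => simp
  | cons x xs ih => simpa using ih

-- popping at the index of the first occurrence of c removes exactly that occurrence
theorem pop_at_index (sl : List Char) (c : Char) (k : Nat) (h : PySem.List.index? sl c = some k) :
    PySem.List.pop? sl (k : Int) = some (c, sl.erase c) := by
  obtain ⟨pre, suf, rfl, rfl, hnm⟩ := (PySem.List.index?_eq_some_iff sl c _).mp h
  have hlt : pre.length < (pre ++ c :: suf).length := by simp
  rw [PySem.List.pop?_natCast _ _ hlt]
  refine congrArg some (Prod.ext (by simp) ?_)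
  show (pre ++ c :: suf).eraseIdx pre.length = (pre ++ c :: suf).erase c
  rw [List.erase_append_right _ hnm, List.erase_cons_head, eraseIdx_append_cons]

-- the sub-multiset condition steps down through one removal
theorem count_step (c : Char) (rest sl : List Char) :
    (∀ x, (c :: rest).count x ≤ sl.count x) ↔
      c ∈ sl ∧ (∀ x, rest.count x ≤ (sl.erase c).count x) := by
  constructor
  · intro h
    have hc : c ∈ sl := by
      have := h c
      simp at this
      exact List.count_pos_iff.mp (by omega)
    refine ⟨hc, fun x => ?_⟩
    have hx := h x
    simp only [List.count_cons, List.count_erase, beq_iff_eq] at hx ⊢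
    split_ifs at hx ⊢ <;> omega
  · rintro ⟨hc, h⟩ x
    have hx := h x
    have hcpos : 1 ≤ sl.count c := List.count_pos_iff.mpr hc
    simp only [List.count_cons, List.count_erase, beq_iff_eq] at hx ⊢
    by_cases h1 : c = x
    · subst h1; simp at hx ⊢; omega
    · simp [h1] at hx ⊢; omega

theorem subseqAux_some (t : List Char) : ∀ (sl m : List Char),
    (∀ x, t.count x ≤ sl.count x) →
    ∃ m', subseqAux t sl m = some m' ∧ m'.length = m.length + t.length := by
  induction t with
  | nil => intro sl m _; exact ⟨m, by simp [subseqAux], by simp⟩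
  | cons c rest ih =>
    intro sl m h
    obtain ⟨hc, h'⟩ := (count_step c rest sl).mp h
    obtain ⟨k, hk⟩ := Option.isSome_iff_exists.mp ((PySem.List.index?_isSome_iff sl c).mpr hc)
    obtain ⟨m', hm', hlen⟩ := ih (sl.erase c) (m ++ [c]) h'
    refine ⟨m', ?_, ?_⟩
    · show subseqAux (c :: rest) sl m = some m'
      rw [subseqAux, hk]
      simp only [pop_at_index sl c k hk]
      exact hm'
    · simp only [List.length_append, List.length_cons, List.length_nil] at hlen ⊢
      omega

theorem subseqAux_count (t : List Char) : ∀ (sl m m' : List Char),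
    subseqAux t sl m = some m' → ∀ x, t.count x ≤ sl.count x := by
  induction t with
  | nil => intro sl m m' _ x; simp
  | cons c rest ih =>
    intro sl m m' h
    cases hk : PySem.List.index? sl c with
    | none =>
      rw [subseqAux, hk] at h
      exact absurd h (by simp)
    | some k =>
      rw [subseqAux, hk] at h
      simp only [pop_at_index sl c k hk] at h
      have hc : c ∈ sl := (PySem.List.index?_isSome_iff sl c).mp (Option.isSome_iff_exists.mpr ⟨k, hk⟩)
      exact (count_step c rest sl).mpr ⟨hc, ih (sl.erase c) (m ++ [c]) m' h⟩

-- characterization of A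
theorem subsequense2_true_iff (seq target : String) :
    subsequense2 seq target = true ↔
      ∀ x, target.toList.count x ≤ seq.toList.count x := by
  unfold subsequense2
  constructor
  · intro h
    by_cases hlen : PySem.Str.len seq < PySem.Str.len target
    · rw [if_pos hlen] at h; exact absurd h (by simp)
    · rw [if_neg hlen] at h
      cases hA : subseqAux target.toList seq.toList [] with
      | none => rw [hA] at h; exact absurd h (by simp)
      | some m => exact subseqAux_count _ _ _ _ hA
  · intro h
    have hsub : target.toList.Subperm seq.toList :=
      List.subperm_ext_iff.mpr (fun x _ => h x)
    have hle : target.toList.length ≤ seq.toList.length := hsub.length_le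
    have hguard : ¬ (PySem.Str.len seq < PySem.Str.len target) := by
      simp only [PySem.Str.len_eq, not_lt]
      omega
    rw [if_neg hguard]
    obtain ⟨m', hm', hlen⟩ := subseqAux_some target.toList seq.toList [] h
    rw [hm']
    have hml : m'.length = target.toList.length := by simpa using hlen
    simp only [PySem.Str.len_eq, beq_iff_eq, hml]

-- once j has reached len(st) the merge loop never moves it
theorem mergeLoop_stuck (sa : List Char) (st : List Char) (j : Nat) (h : ¬ j < st.length) :
    mergeLoop sa st j = j := by
  induction sa with
  | nil => rfl
  | cons c rest ih => simp [mergeLoop, h, ih]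

-- the two-pointer merge scan is the greedy subsequence test (any lists)
theorem mergeLoop_spec (sa : List Char) : ∀ (st : List Char) (j : Nat), j ≤ st.length →
    (mergeLoop sa st j = st.length ↔ (st.drop j).Sublist sa) := by
  induction sa with
  | nil =>
    intro st j hj
    simp only [mergeLoop, List.sublist_nil, List.drop_eq_nil_iff]
    omega
  | cons c rest ih =>
    intro st j hj
    by_cases h : j < st.length
    · have hdrop : st.drop j = st[j] :: st.drop (j + 1) := List.drop_eq_getElem_cons h
      by_cases hc : c = st[j]
      · rw [mergeLoop, dif_pos h, if_pos hc, ih st (j + 1) h, hdrop, ← hc]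
        exact (List.cons_sublist_cons).symm
      · rw [mergeLoop, dif_pos h, if_neg hc, ih st j (le_of_lt h), hdrop]
        constructor
        · exact List.sublist_cons_of_sublist c
        · intro hs
          cases hs with
          | cons _ hs' => exact hs'
          | cons₂ => exact absurd rfl hc
    · have hj' : j = st.length := by omega
      rw [mergeLoop_stuck (c :: rest) st j h]
      simp [hj', List.drop_length]

-- characterization of B
theorem subsequense2_alt_true_iff (seq target : String) :
    subsequense2_alt seq target = true ↔
      ∀ x, target.toList.count x ≤ seq.toList.count x := by
  unfold subsequense2_alt
  have hpa : (PySem.List.sorted seq.toList (fun x => x) false).Perm seq.toList :=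
    PySem.List.sorted_perm _ _ _
  have hpt : (PySem.List.sorted target.toList (fun x => x) false).Perm target.toList :=
    PySem.List.sorted_perm _ _ _
  rw [beq_iff_eq,
    mergeLoop_spec _ (PySem.List.sorted target.toList (fun x => x) false) 0 (Nat.zero_le _),
    List.drop_zero]
  constructor
  · intro hs x
    have : (PySem.List.sorted target.toList (fun x => x) false).Subperm
        (PySem.List.sorted seq.toList (fun x => x) false) := hs.subperm
    have hcnt := this.count_le x
    rwa [hpa.count_eq, hpt.count_eq] at hcnt
  · intro h
    have hsub : (PySem.List.sorted target.toList (fun x => x) false).Subperm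
        (PySem.List.sorted seq.toList (fun x => x) false) := by
      refine List.subperm_ext_iff.mpr (fun x _ => ?_)
      rw [hpa.count_eq, hpt.count_eq]
      exact h x
    exact List.sublist_of_subperm_of_pairwise hsub
      (PySem.List.sorted_pairwise _ _)
      (PySem.List.sorted_pairwise _ _)

-- ===== VERDICT (by name: the statement is the Claim_ definition above) =====
theorem subsequense2_spec : Claim_equal_subsequense2 := by
  intro seq target _
  show subsequense2 seq target = subsequense2_alt seq target
  exact Bool.eq_iff_iff.mpr
    ((subsequense2_true_iff seq target).trans (subsequense2_alt_true_iff seq target).symm)
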